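-- pv_equiv track=rewrite | github.com/Jesseilangoraja/github-portfolio | NBA _term_project.py | player_search
-- ===== SOURCE A (Python) =====
-- def player_search(players, target):
--     #soting list
--     sorted_players = sorted(players.keys())
--
--     left = 0
--     right = len(sorted_players) - 1
--
--     while left <= right:
--         mid = (left + right) // 2
--         mid_player = sorted_players[mid]
--
--         # Check if the target player is found
--         if mid_player == target:
--             return players[mid_player]
--         elif mid_player < target:
--             left = mid + 1
--         else:
--             right = mid - 1
--
--     # If the player is not found, return None
--     return None
-- ===== SOURCE B (Python) =====
-- def player_search(players, target):
--     # single linear scan over the dict items; no sorting, no binary search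
--     for name, value in players.items():
--         if name == target:
--             return value
--     return None
-- ===== Notes on version B (the rewrite author's own statement) =====
-- stated objective: simpler
-- what changed: Replaced sort-the-keys-then-binary-search with a single linear scan over the dict items returning the first matching value.
import Mathlib
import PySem

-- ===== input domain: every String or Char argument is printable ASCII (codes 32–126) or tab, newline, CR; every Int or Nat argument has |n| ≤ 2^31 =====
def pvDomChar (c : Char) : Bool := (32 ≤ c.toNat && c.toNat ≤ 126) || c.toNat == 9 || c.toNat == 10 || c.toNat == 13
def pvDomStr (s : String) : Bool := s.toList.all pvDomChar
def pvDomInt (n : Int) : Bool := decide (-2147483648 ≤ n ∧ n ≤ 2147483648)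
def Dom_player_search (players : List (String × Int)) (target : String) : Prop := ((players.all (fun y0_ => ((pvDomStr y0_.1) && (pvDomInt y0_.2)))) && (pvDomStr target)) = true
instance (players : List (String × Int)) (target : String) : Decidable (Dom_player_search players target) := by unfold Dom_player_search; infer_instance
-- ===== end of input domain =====

-- B changes the algorithm: one linear scan over the items instead of A's sort-the-keys + binary search (return value only).

-- ===== PORT A =====
-- the while loop of A: left/right binary search over the sorted key list
def psLoop (players : List (String × Int)) (xs : List String) (target : String) (left right : Int) : Option Int :=
  if h : left ≤ right then
    match PySem.List.pyGet? xs (PySem.Int.floordiv (left + right) 2) with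
    | none => none  -- unreachable: mid is always in range
    | some mid_player =>
      if mid_player = target then (PySem.Dict.mk players).get? mid_player
      else if mid_player < target then
        psLoop players xs target (PySem.Int.floordiv (left + right) 2 + 1) right
      else
        psLoop players xs target left (PySem.Int.floordiv (left + right) 2 - 1)
  else none
termination_by (right + 1 - left).toNat
decreasing_by
  · have := PySem.Int.floordiv_two_mid_bounds h
    omega
  · have := PySem.Int.floordiv_two_mid_bounds h
    omega

def player_search (players : List (String × Int)) (target : String) : Option Int :=
  let sorted_players := PySem.List.sorted (PySem.Dict.mk players).keys (fun x => x) false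
  psLoop players sorted_players target 0 ((sorted_players.length : Int) - 1)

-- ===== PORT B =====
def player_search_alt (players : List (String × Int)) (target : String) : Option Int :=
  match players with
  | [] => none
  | (name, value) :: rest =>
    if name = target then some value else player_search_alt rest target

-- ===== PRECONDITION & SPEC =====
def Spec_player_search (players : List (String × Int)) (target : String) (out : Option Int) : Prop := out = player_search_alt players target
instance (players : List (String × Int)) (target : String) (out : Option Int) : Decidable (Spec_player_search players target out) := by unfold Spec_player_search; infer_instance

-- ===== CLAIM (what is proved, stated in full; the proofs are below) =====
def Claim_equal_player_search : Prop := ∀ (players : List (String × Int)) (target : String), Dom_player_search players target → Spec_player_search players target (player_search players target)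

-- ===== LEMMAS AND PROOFS =====

-- B's linear scan is exactly the dict lookup (first match)
lemma alt_eq_get? (players : List (String × Int)) (target : String) :
    player_search_alt players target = (PySem.Dict.mk players).get? target := by
  induction players with
  | nil => simp [player_search_alt, PySem.Dict.get?]
  | cons p rest ih =>
    obtain ⟨name, value⟩ := p
    rw [player_search_alt, PySem.Dict.get?_mk_cons, ih]
    by_cases hne : name = target <;> simp [hne]

-- binary-search correctness on the sorted key list
lemma psLoop_eq (players : List (String × Int)) (ks : List String) (target : String)
    (n : Nat) :
    ∀ left right : Int,
      (right + 1 - left).toNat ≤ n → 0 ≤ left →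
      right < (PySem.List.sorted ks (fun x => x) false).length →
      (∀ i : Nat, (hi : i < (PySem.List.sorted ks (fun x => x) false).length) →
        (PySem.List.sorted ks (fun x => x) false)[i] = target →
        left ≤ (i : Int) ∧ (i : Int) ≤ right) →
      psLoop players (PySem.List.sorted ks (fun x => x) false) target left right =
        if target ∈ ks then (PySem.Dict.mk players).get? target else none := by
  induction n with
  | zero =>
    intro left right hn h0 hr hinv
    have hlr : ¬ left ≤ right := by omega
    rw [psLoop, dif_neg hlr]
    have hnot : target ∉ ks := by
      intro hmem
      have hmemS : target ∈ PySem.List.sorted ks (fun x => x) false :=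
        (PySem.List.mem_sorted ks (fun x => x) false target).mpr hmem
      obtain ⟨i, hi, hieq⟩ := List.mem_iff_getElem.mp hmemS
      have := hinv i hi hieq
      omega
    simp [hnot]
  | succ n ih =>
    intro left right hn h0 hr hinv
    by_cases hlr : left ≤ right
    · set S := PySem.List.sorted ks (fun x => x) false with hS
      rw [psLoop, dif_pos hlr]
      obtain ⟨hm1, hm2⟩ := PySem.Int.floordiv_two_mid_bounds hlr
      generalize hmd : PySem.Int.floordiv (left + right) 2 = mid at hm1 hm2 ⊢
      have hmlen : mid.toNat < S.length := by omega
      have hget : PySem.List.pyGet? S mid = some S[mid.toNat] := by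
        have hmc : mid = ((mid.toNat : Nat) : Int) := by omega
        conv_lhs => rw [hmc]
        rw [PySem.List.pyGet?_natCast, List.getElem?_eq_getElem hmlen]
      rw [hget]
      dsimp only
      by_cases heq : S[mid.toNat] = target
      · rw [if_pos heq]
        have hmem : target ∈ ks := by
          rw [← heq]
          exact (PySem.List.mem_sorted ks (fun x => x) false _).mp (List.getElem_mem hmlen)
        rw [if_pos hmem, heq]
      · rw [if_neg heq]
        by_cases hlt : S[mid.toNat] < target
        · rw [if_pos hlt]
          apply ih
          · omega
          · omega
          · exact hr
          · intro i hi hieq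
            have hold := hinv i hi hieq
            refine ⟨?_, hold.2⟩
            by_contra hc
            have hile : i ≤ mid.toNat := by omega
            have hmono := PySem.List.sorted_id_getElem_mono ks hile hmlen
            simp only [← hS] at hmono
            rw [hieq] at hmono
            exact absurd hmono (not_le.mpr hlt)
        · rw [if_neg hlt]
          have htg : target < S[mid.toNat] :=
            lt_of_le_of_ne (not_lt.mp hlt) (fun h => heq h.symm)
          apply ih
          · omega
          · exact h0
          · omega
          · intro i hi hieq
            have hold := hinv i hi hieq
            refine ⟨hold.1, ?_⟩
            by_contra hc
            have hile : mid.toNat ≤ i := by omega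
            have hmono := PySem.List.sorted_id_getElem_mono ks hile hi
            simp only [← hS] at hmono
            rw [hieq] at hmono
            exact absurd (lt_of_le_of_lt hmono htg) (lt_irrefl _)
    · have hnot : target ∉ ks := by
        intro hmem
        have hmemS : target ∈ PySem.List.sorted ks (fun x => x) false :=
          (PySem.List.mem_sorted ks (fun x => x) false target).mpr hmem
        obtain ⟨i, hi, hieq⟩ := List.mem_iff_getElem.mp hmemS
        have := hinv i hi hieq
        omega
      rw [psLoop, dif_neg hlr]
      simp [hnot]

-- ===== VERDICT (by name: the statement is the Claim_ definition above) =====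
theorem player_search_spec : Claim_equal_player_search := by
  intro players target _
  unfold Spec_player_search
  rw [alt_eq_get?]
  show psLoop players (PySem.List.sorted (PySem.Dict.mk players).keys (fun x => x) false) target 0
      (((PySem.List.sorted (PySem.Dict.mk players).keys (fun x => x) false).length : Int) - 1) =
    (PySem.Dict.mk players).get? target
  rw [psLoop_eq players (PySem.Dict.mk players).keys target
      (PySem.List.sorted (PySem.Dict.mk players).keys (fun x => x) false).length 0
      (((PySem.List.sorted (PySem.Dict.mk players).keys (fun x => x) false).length : Int) - 1)
      (by omega) (by omega) (by omega)
      (by intro i hi _; omega)]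
  by_cases ht : target ∈ (PySem.Dict.mk players).keys
  · rw [if_pos ht]
  · rw [if_neg ht, Eq.symm ((PySem.Dict.get?_eq_none_iff_not_mem_keys _ _).mpr ht)]
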